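-- pv_equiv track=rewrite | github.com/Abhinanddas/Python | picking_tickets.py | picking_tickets
-- ===== SOURCE A (Python) =====
-- def quicksort(array):
--
--     if len(array) < 2:
--         return array
--
--     left =0
--     pivot =  len(array)-1
--
--     while(left < pivot):
--         if array[left] > array[pivot]:
--
--             array[left], array[pivot -1] = array[pivot -1],array[left]
--             array[pivot-1], array[pivot] = array[pivot], array[pivot -1]
--             pivot -= 1
--         else:
--             left +=1
--     l = quicksort(array[:pivot])
--     r = quicksort(array[pivot+1:])
--
--     return l  + [array[pivot]] + r
--
-- def picking_tickets(arr):
--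
--     arr = quicksort(arr)
--
--     largest_sub_sequence =0
--     index =0
--     for x in arr:
--         sub_sequence = [x]
--         largest_num_in_sequence = x
--         for j in range(len(arr)):
--
--             if j == index:
--                 continue
--
--             diff =  arr[j] - largest_num_in_sequence
--             if diff in [0,1]:
--                 sub_sequence.append(arr[j])
--                 largest_num_in_sequence = arr[j]
--             else:
--                 continue
--
--         index +=1
--
--         if len(sub_sequence) > largest_sub_sequence:
--             largest_sub_sequence = len(sub_sequence)
--
--     return largest_sub_sequence
-- ===== SOURCE B (Python) =====
-- def picking_tickets(arr):
--     best = 0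
--     run = 0
--     prev = None
--     for x in sorted(arr):
--         if prev is not None and x - prev <= 1:
--             run += 1
--         else:
--             run = 1
--         prev = x
--         if run > best:
--             best = run
--     return best
-- ===== Notes on version B (the rewrite author's own statement) =====
-- stated objective: faster
-- what changed: Replaced the hand-written quicksort plus a quadratic per-element rescan of the whole array with a single sorted() call followed by one linear pass tracking the current run length (reset when the gap between adjacent sorted values exceeds 1).
import Mathlib
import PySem

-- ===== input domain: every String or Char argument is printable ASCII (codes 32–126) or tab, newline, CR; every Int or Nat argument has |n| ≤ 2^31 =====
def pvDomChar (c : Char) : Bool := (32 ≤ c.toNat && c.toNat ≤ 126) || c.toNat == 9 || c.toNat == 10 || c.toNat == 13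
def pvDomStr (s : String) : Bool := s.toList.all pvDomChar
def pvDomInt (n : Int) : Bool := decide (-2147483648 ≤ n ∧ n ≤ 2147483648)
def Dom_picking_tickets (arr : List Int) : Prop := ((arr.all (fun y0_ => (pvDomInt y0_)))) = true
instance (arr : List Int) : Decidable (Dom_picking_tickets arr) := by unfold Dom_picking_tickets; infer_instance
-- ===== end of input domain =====

-- B replaces A's quicksort + quadratic per-element rescan by sort + one linear run-length pass
-- (equivalence is about the RETURN value only: Python A sorts its argument in place, B does not).

-- ===== PORT A =====
-- the two simultaneous assignments of the while-loop body (old values on the right of each)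
def qswapStep (a : List Int) (left pivot : Nat) : List Int :=
  let a1 := (a.set left (a.getD (pivot - 1) 0)).set (pivot - 1) (a.getD left 0)
  (a1.set (pivot - 1) (a1.getD pivot 0)).set pivot (a1.getD (pivot - 1) 0)

-- the while-loop of quicksort; fuel = pivot - left bounds the iteration count exactly
-- (all indices are in range on every call the ports make)
def qloop : Nat → List Int → Nat → Nat → List Int × Nat
  | 0, a, _, pivot => (a, pivot)
  | fuel + 1, a, left, pivot =>
    if left < pivot then
      if a.getD left 0 > a.getD pivot 0 then qloop fuel (qswapStep a left pivot) left (pivot - 1)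
      else qloop fuel a (left + 1) pivot
    else (a, pivot)

-- the recursion of quicksort; fuel = a.length bounds the recursion depth
def quicksortAux : Nat → List Int → List Int
  | 0, a => a
  | fuel + 1, a =>
    if a.length < 2 then a
    else
      let r := qloop (a.length - 1) a 0 (a.length - 1)
      -- arr[:pivot] and arr[pivot+1:]
      quicksortAux fuel (r.1.take r.2) ++ [r.1.getD r.2 0] ++ quicksortAux fuel (r.1.drop (r.2 + 1))

def quicksort (a : List Int) : List Int := quicksortAux a.length a

def picking_tickets (arr : List Int) : Int :=
  let s := quicksort arr
  (s.foldl (fun (st : Int × Nat) x =>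
      let inner := (List.range s.length).foldl (fun (acc : List Int × Int) j =>
          if j = st.2 then acc
          else
            let diff := s.getD j 0 - acc.2
            if diff = 0 ∨ diff = 1 then (acc.1 ++ [s.getD j 0], s.getD j 0) else acc)
        ([x], x)
      ((if (inner.1.length : Int) > st.1 then (inner.1.length : Int) else st.1), st.2 + 1))
    ((0 : Int), (0 : Nat))).1

-- ===== PORT B =====
def picking_tickets_alt (arr : List Int) : Int :=
  ((PySem.List.sorted arr (fun x => x) false).foldl
    (fun (st : Int × Int × Option Int) x =>
      let run : Int := match st.2.2 with
        | some p => if x - p ≤ 1 then st.2.1 + 1 else 1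
        | none => 1
      ((if run > st.1 then run else st.1), run, some x))
    (0, 0, none)).1

-- ===== PRECONDITION & SPEC =====
def Spec_picking_tickets (arr : List Int) (out : Int) : Prop := out = picking_tickets_alt arr
instance (arr : List Int) (out : Int) : Decidable (Spec_picking_tickets arr out) := by unfold Spec_picking_tickets; infer_instance

-- ===== CLAIM (what is proved, stated in full; the proofs are below) =====
def Claim_equal_picking_tickets : Prop := ∀ (arr : List Int), Dom_picking_tickets arr → Spec_picking_tickets arr (picking_tickets arr)

-- ===== LEMMAS AND PROOFS =====

theorem list_swap_perm (a : List Int) (i j : Nat) (hi : i < a.length) (hj : j < a.length) :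
    ((a.set i (a.getD j 0)).set j (a.getD i 0)).Perm a := by
  have h := Array.swap_perm (xs := a.toArray) (i := i) (j := j) (by simpa) (by simpa)
  rw [List.getD_eq_getElem _ _ hi, List.getD_eq_getElem _ _ hj]
  rw [Array.perm_iff_toList_perm] at h
  simpa [Array.swap] using h


theorem qswapStep_perm (a : List Int) (l p : Nat) (hl : l < p) (hp : p < a.length) :
    (qswapStep a l p).Perm a := by
  unfold qswapStep
  have h1 := list_swap_perm a l (p-1) (by omega) (by omega)
  have e1 : ((a.set l (a.getD (p-1) 0)).set (p-1) (a.getD l 0)).length = a.length := by simp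
  have h2 := list_swap_perm ((a.set l (a.getD (p-1) 0)).set (p-1) (a.getD l 0)) (p-1) p
      (by omega) (by omega)
  exact h2.trans h1


set_option maxRecDepth 4096 in
theorem qswapStep_getD (a : List Int) (l p : Nat) (hl : l < p) (hp : p < a.length) :
    (qswapStep a l p).getD (p-1) 0 = a.getD p 0 ∧
    (qswapStep a l p).getD p 0 = a.getD l 0 ∧
    (∀ i, i ≠ l → i ≠ p-1 → i ≠ p → (qswapStep a l p).getD i 0 = a.getD i 0) := by
  unfold qswapStep
  refine ⟨?_, ?_, fun i h1 h2 h3 => ?_⟩ <;>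
    · simp only [List.getD_eq_getElem?_getD, List.getElem?_set, List.length_set]
      split_ifs <;> first | rfl | omega

theorem qswapStep_length (a : List Int) (l p : Nat) : (qswapStep a l p).length = a.length := by
  simp [qswapStep]

theorem qloop_length (fuel : Nat) : ∀ (a : List Int) (l p : Nat),
    ((qloop fuel a l p).1).length = a.length := by
  induction fuel with
  | zero => intro a l p; rfl
  | succ n ih =>
    intro a l p
    simp only [qloop]
    split_ifs with h hc
    · rw [ih]; exact qswapStep_length a l p
    · exact ih a (l+1) p
    · rfl

theorem qloop_snd_le (fuel : Nat) : ∀ (a : List Int) (l p : Nat), (qloop fuel a l p).2 ≤ p := by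
  induction fuel with
  | zero => intro a l p; exact Nat.le_refl _
  | succ n ih =>
    intro a l p
    simp only [qloop]
    split_ifs with h hc
    · have := ih (qswapStep a l p) l (p-1); omega
    · exact ih a (l+1) p
    · exact Nat.le_refl _

theorem qloop_part (fuel : Nat) : ∀ (a : List Int) (l p : Nat),
    p - l ≤ fuel → l ≤ p → p < a.length →
    (∀ i, i < l → a.getD i 0 ≤ a.getD p 0) →
    (∀ i, p < i → i < a.length → a.getD p 0 < a.getD i 0) →
    (qloop fuel a l p).1.Perm a ∧
    (qloop fuel a l p).1.getD (qloop fuel a l p).2 0 = a.getD p 0 ∧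
    (∀ i, i < (qloop fuel a l p).2 → (qloop fuel a l p).1.getD i 0 ≤ a.getD p 0) ∧
    (∀ i, (qloop fuel a l p).2 < i → i < a.length → a.getD p 0 < (qloop fuel a l p).1.getD i 0) := by
  induction fuel with
  | zero =>
    intro a l p hf hl hp hlow hhigh
    have : l = p := by omega
    subst this
    exact ⟨List.Perm.refl _, rfl, fun i hi => hlow i hi, hhigh⟩
  | succ n ih =>
    intro a l p hf hl hp hlow hhigh
    simp only [qloop]
    split_ifs with h hc
    · obtain ⟨e1, e2, e3⟩ := qswapStep_getD a l p h hp
      have hlen := qswapStep_length a l p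
      have hperm := qswapStep_perm a l p h hp
      have ih' := ih (qswapStep a l p) l (p-1) (by omega) (by omega) (by omega)
        (fun i hi => by
          rw [e3 i (by omega) (by omega) (by omega), e1]
          exact hlow i hi)
        (fun i h1 h2 => by
          rw [e1]
          rcases Nat.lt_or_ge p i with h3 | h3
          · rw [e3 i (by omega) (by omega) (by omega)]
            exact hhigh i h3 (by omega)
          · have : i = p := by omega
            subst this
            rw [e2]; exact hc)
      refine ⟨ih'.1.trans hperm, ?_, ?_, ?_⟩
      · rw [ih'.2.1, e1]
      · intro i hi; rw [← e1]; exact ih'.2.2.1 i hi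
      · intro i h1 h2; rw [← e1]; exact ih'.2.2.2 i h1 (by omega)
    · exact ih a (l+1) p (by omega) (by omega) hp (fun i hi => by
        rcases Nat.lt_or_ge i l with h1 | h1
        · exact hlow i h1
        · have : i = l := by omega
          subst this; omega) hhigh
    · have : l = p := by omega
      subst this
      exact ⟨List.Perm.refl _, rfl, fun i hi => hlow i hi, hhigh⟩

theorem quicksortAux_props (fuel : Nat) : ∀ (a : List Int), a.length ≤ fuel →
    (quicksortAux fuel a).Perm a ∧ (quicksortAux fuel a).Pairwise (· ≤ ·) := by
  induction fuel with
  | zero =>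
    intro a ha
    have : a = [] := List.eq_nil_of_length_eq_zero (by omega)
    subst this
    exact ⟨List.Perm.refl _, List.Pairwise.nil⟩
  | succ n ih =>
    intro a ha
    simp only [quicksortAux]
    split_ifs with h
    · refine ⟨List.Perm.refl _, ?_⟩
      match a, h with
      | [], _ => exact List.Pairwise.nil
      | [x], _ => simp
    · set r := qloop (a.length - 1) a 0 (a.length - 1) with hr
      have hlen := qloop_length (a.length - 1) a 0 (a.length - 1)
      have hle := qloop_snd_le (a.length - 1) a 0 (a.length - 1)
      have hpart := qloop_part (a.length - 1) a 0 (a.length - 1) (by omega) (by omega) (by omega)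
        (by omega) (fun i h1 h2 => by omega)
      rw [← hr] at hlen hle hpart
      obtain ⟨hperm, hpv, hlo, hhi⟩ := hpart
      have hr2 : r.2 < r.1.length := by omega
      have hdec : r.1 = r.1.take r.2 ++ r.1.getD r.2 0 :: r.1.drop (r.2 + 1) := by
        conv_lhs => rw [← List.take_append_drop r.2 r.1]
        rw [List.drop_eq_getElem_cons hr2, List.getD_eq_getElem _ _ hr2]
      have ih1 := ih (r.1.take r.2) (by simp only [List.length_take]; omega)
      have ih2 := ih (r.1.drop (r.2 + 1)) (by simp only [List.length_drop]; omega)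
      have hmem_take : ∀ y ∈ r.1.take r.2, y ≤ a.getD (a.length - 1) 0 := by
        intro y hy
        obtain ⟨i, hi, hey⟩ := List.getElem_of_mem hy
        have hi' : i < r.2 := by simp [List.length_take] at hi; omega
        rw [List.getElem_take] at hey
        have h2 := hlo i hi'
        rw [List.getD_eq_getElem _ _ (by omega)] at h2
        omega
      have hmem_drop : ∀ z ∈ r.1.drop (r.2 + 1), a.getD (a.length - 1) 0 < z := by
        intro z hz
        obtain ⟨i, hi, hez⟩ := List.getElem_of_mem hz
        rw [List.getElem_drop] at hez
        have hi' : r.2 + 1 + i < a.length := by simp [List.length_drop] at hi; omega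
        have h2 := hhi (r.2 + 1 + i) (by omega) hi'
        rw [List.getD_eq_getElem r.1 _ (by omega)] at h2
        omega
      constructor
      · have p1 : (quicksortAux n (r.1.take r.2) ++ [r.1.getD r.2 0] ++ quicksortAux n (r.1.drop (r.2 + 1))).Perm
            (r.1.take r.2 ++ [r.1.getD r.2 0] ++ r.1.drop (r.2 + 1)) :=
          (ih1.1.append (List.Perm.refl _)).append ih2.1
        refine p1.trans ?_
        rw [List.append_assoc, List.singleton_append, ← hdec]
        exact hperm
      · rw [List.append_assoc, List.singleton_append, List.pairwise_append]
        refine ⟨ih1.2, List.Pairwise.cons ?_ ih2.2, ?_⟩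
        · intro z hz
          have h2 := hmem_drop z ((ih2.1.mem_iff).mp hz)
          omega
        · intro y hy z hz
          have hy' := hmem_take y ((ih1.1.mem_iff).mp hy)
          rcases List.mem_cons.mp hz with rfl | hz'
          · omega
          · have h2 := hmem_drop z ((ih2.1.mem_iff).mp hz')
            omega

theorem quicksort_props (a : List Int) :
    (quicksort a).Perm a ∧ (quicksort a).Pairwise (· ≤ ·) :=
  quicksortAux_props a.length a (le_refl _)

def gl : List Int → Int → Nat × Int
  | [], L => (0, L)
  | y :: t, L => if y - L = 0 ∨ y - L = 1 then ((gl t y).1 + 1, (gl t y).2) else gl t L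

def gla : List Int → List Int × Int → List Int × Int
  | [], st => st
  | y :: t, st => if y - st.2 = 0 ∨ y - st.2 = 1 then gla t (st.1 ++ [y], y) else gla t st

def innerFold (i : Nat) : List Int → Nat → List Int × Int → List Int × Int
  | [], _, st => st
  | y :: t, k, st =>
      innerFold i t (k+1)
        (if k = i then st else (if y - st.2 = 0 ∨ y - st.2 = 1 then (st.1 ++ [y], y) else st))

def istep (s : List Int) (i : Nat) (acc : List Int × Int) (j : Nat) : List Int × Int :=
  if j = i then acc
  else
    let diff := s.getD j 0 - acc.2
    if diff = 0 ∨ diff = 1 then (acc.1 ++ [s.getD j 0], s.getD j 0) else acc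

theorem range'_innerFold (s : List Int) (i : Nat) :
    ∀ n k st, k + n = s.length →
      (List.range' k n).foldl (istep s i) st = innerFold i (s.drop k) k st := by
  intro n
  induction n with
  | zero =>
    intro k st hk
    rw [List.drop_of_length_le (by omega)]
    simp [innerFold]
  | succ n ih =>
    intro k st hk
    have hks : k < s.length := by omega
    rw [List.range'_succ, List.foldl_cons, List.drop_eq_getElem_cons hks]
    rw [ih (k+1) _ (by omega)]
    simp only [innerFold]
    congr 1
    simp [istep, List.getD_eq_getElem?_getD, List.getElem?_eq_getElem hks]

theorem innerFold_noskip : ∀ (l : List Int) i k st, i < k → innerFold i l k st = gla l st := by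
  intro l
  induction l with
  | nil => intros; rfl
  | cons y t ih =>
    intro i k st hik
    simp only [innerFold, gla, if_neg (by omega : ¬ k = i)]
    split_ifs with h
    · exact ih i (k+1) _ (by omega)
    · exact ih i (k+1) _ (by omega)

theorem innerFold_split : ∀ (u : List Int) x v i k st, k + u.length = i →
    innerFold i (u ++ x :: v) k st = gla v (gla u st) := by
  intro u
  induction u with
  | nil =>
    intro x v i k st hk
    have hk' : k = i := by simpa using hk
    simp only [List.nil_append, innerFold, gla]
    rw [if_pos hk', innerFold_noskip _ i (k+1) st (by omega)]
  | cons y u' ih =>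
    intro x v i k st hk
    simp only [List.cons_append, innerFold, gla]
    rw [if_neg (by simp at hk ⊢; omega)]
    split_ifs with h
    · exact ih x v i (k+1) _ (by simp at hk ⊢; omega)
    · exact ih x v i (k+1) _ (by simp at hk ⊢; omega)

theorem gla_fst_len : ∀ (l : List Int) st, (gla l st).1.length = st.1.length + (gl l st.2).1 := by
  intro l
  induction l with
  | nil => intro st; simp [gla, gl]
  | cons y t ih =>
    intro st
    simp only [gla, gl]
    split_ifs with h
    · rw [ih]; simp; omega
    · rw [ih]

theorem gla_snd : ∀ (l : List Int) st, (gla l st).2 = (gl l st.2).2 := by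
  intro l
  induction l with
  | nil => intro st; simp [gla, gl]
  | cons y t ih =>
    intro st
    simp only [gla, gl]
    split_ifs with h
    · rw [ih]
    · rw [ih]

theorem gl_append : ∀ (u v : List Int) L,
    gl (u ++ v) L = ((gl u L).1 + (gl v (gl u L).2).1, (gl v (gl u L).2).2) := by
  intro u
  induction u with
  | nil => intro v L; simp [gl]
  | cons y t ih =>
    intro v L
    simp only [List.cons_append, gl]
    split_ifs with h
    · rw [ih]; simp [Nat.add_right_comm]
    · rw [ih]

theorem gl_zero : ∀ (v : List Int) L, (∀ z ∈ v, ¬(z - L = 0 ∨ z - L = 1)) → gl v L = (0, L) := by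
  intro v
  induction v with
  | nil => intros; rfl
  | cons z t ih =>
    intro L h
    simp only [gl, if_neg (h z (by simp))]
    exact ih L (fun z' hz' => h z' (by simp [hz']))

theorem gl_fix : ∀ (u : List Int) L, (∀ y ∈ u, y ≤ L) → (gl u L).2 = L := by
  intro u
  induction u with
  | nil => intros; rfl
  | cons y t ih =>
    intro L h
    have hy : y ≤ L := h y (by simp)
    simp only [gl]
    split_ifs with hif
    · have : y = L := by omega
      subst this
      exact ih y (fun z hz => h z (by simp [hz]))
    · exact ih L (fun z hz => h z (by simp [hz]))

theorem gl_largest : ∀ (l : List Int) L, (gl l L).2 = L ∨ (gl l L).2 ∈ l := by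
  intro l
  induction l with
  | nil => intro L; left; rfl
  | cons y t ih =>
    intro L
    simp only [gl]
    split_ifs with h
    · rcases ih y with h1 | h1
      · right; simp [h1]
      · right; simp [h1]
    · rcases ih L with h1 | h1
      · left; exact h1
      · right; simp [h1]

theorem gl_le_length : ∀ (l : List Int) L, (gl l L).1 ≤ l.length := by
  intro l
  induction l with
  | nil => intro L; simp [gl]
  | cons y t ih =>
    intro L
    simp only [gl, List.length_cons]
    split_ifs with h
    · have := ih y; omega
    · have := ih L; omega

theorem gl_chain : ∀ (l : List Int) L, List.IsChain (fun a b => a ≤ b ∧ b ≤ a + 1) (L :: l) →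
    (gl l L).1 = l.length := by
  intro l
  induction l with
  | nil => intro L _; rfl
  | cons y t ih =>
    intro L hc
    rw [List.isChain_cons_cons] at hc
    obtain ⟨⟨h1, h2⟩, hc⟩ := hc
    simp only [gl, if_pos (by omega : y - L = 0 ∨ y - L = 1)]
    rw [ih y hc]
    simp

def astep (s : List Int) (st : Int × Nat) (x : Int) : Int × Nat :=
  let inner := (List.range s.length).foldl (istep s st.2) ([x], x)
  ((if (inner.1.length : Int) > st.1 then (inner.1.length : Int) else st.1), st.2 + 1)

def bstep (st : Int × Int × Option Int) (x : Int) : Int × Int × Option Int :=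
  let run : Int := match st.2.2 with
    | some p => if x - p ≤ 1 then st.2.1 + 1 else 1
    | none => 1
  ((if run > st.1 then run else st.1), run, some x)

def fmax (c : Int → Int) (m x : Int) : Int := if c x > m then c x else m
def cval (s : List Int) (x : Int) : Int := ((gl s x).1 : Int)

theorem inner_len (s : List Int) (i : Nat) (hi : i < s.length) (hs : s.Pairwise (· ≤ ·)) :
    ((List.range s.length).foldl (istep s i) ([s[i]], s[i])).1.length = (gl s s[i]).1 := by
  rw [List.range_eq_range']
  rw [show (List.range' 0 s.length) = List.range' 0 (s.length) 1 from rfl]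
  rw [range'_innerFold s i s.length 0 _ (by omega)]
  have hsplit : List.drop 0 s = s.take i ++ s[i] :: s.drop (i+1) := by
    rw [List.drop_zero]
    conv_lhs => rw [← List.take_append_drop i s]
    rw [List.drop_eq_getElem_cons hi]
  rw [hsplit, innerFold_split _ _ _ i 0 _ (by simp [List.length_take]; omega)]
  have hfix : (gl (s.take i) s[i]).2 = s[i] := by
    apply gl_fix
    intro y hy
    obtain ⟨j, hj, hey⟩ := List.getElem_of_mem hy
    have hj' : j < i := by simp [List.length_take] at hj; omega
    rw [List.getElem_take] at hey
    have := (List.pairwise_iff_getElem.mp hs) j i (by omega) hi hj'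
    omega
  rw [gla_fst_len, gla_snd, hfix, gla_fst_len]
  set x := s[i] with hx
  have hsplit' : s = s.take i ++ x :: s.drop (i+1) := by rw [← hsplit, List.drop_zero]
  conv_rhs => rw [hsplit']
  rw [gl_append]
  rw [show (gl (s.take i) x).2 = x from hfix]
  simp only [gl]
  rw [if_pos (by omega : x - x = 0 ∨ x - x = 1)]
  simp
  omega

theorem outer (s : List Int) (hs : s.Pairwise (· ≤ ·)) :
    ∀ n k m, k + n = s.length →
      ((s.drop k).foldl (astep s) (m, k)).1 = (s.drop k).foldl (fmax (cval s)) m := by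
  intro n
  induction n with
  | zero =>
    intro k m hk
    rw [List.drop_of_length_le (by omega)]
    rfl
  | succ n ih =>
    intro k m hk
    have hks : k < s.length := by omega
    rw [List.drop_eq_getElem_cons hks, List.foldl_cons, List.foldl_cons]
    have hstep : astep s (m, k) s[k] = (fmax (cval s) m s[k], k + 1) := by
      simp only [astep, fmax, cval]
      rw [inner_len s k hks hs]
    rw [hstep]
    exact ih (k+1) _ (by omega)

theorem foldl_fmax_le (c : Int → Int) : ∀ (l : List Int) m, (∀ x ∈ l, c x ≤ m) →
    l.foldl (fmax c) m = m := by
  intro l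
  induction l with
  | nil => intros; rfl
  | cons y t ih =>
    intro m h
    have : fmax c m y = m := by
      simp only [fmax]
      rw [if_neg (by have := h y (by simp); omega)]
    rw [List.foldl_cons, this]
    exact ih m (fun x hx => h x (by simp [hx]))

theorem foldl_fmax_init (c : Int → Int) : ∀ (l : List Int) a b,
    l.foldl (fmax c) (max a b) = max a (l.foldl (fmax c) b) := by
  intro l
  induction l with
  | nil => intros; rfl
  | cons y t ih =>
    intro a b
    rw [List.foldl_cons, List.foldl_cons]
    have : fmax c (max a b) y = max a (fmax c b y) := by
      simp only [fmax]; split_ifs <;> omega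
    rw [this, ih]

def seg : List Int → List Int × List Int
  | [] => ([], [])
  | [y] => ([y], [])
  | y :: z :: t => if z - y ≤ 1 then ((y :: (seg (z :: t)).1), (seg (z :: t)).2) else ([y], z :: t)

theorem seg_append : ∀ s : List Int, (seg s).1 ++ (seg s).2 = s := by
  intro s
  fun_induction seg s with
  | case1 => rfl
  | case2 => rfl
  | case3 y z t h ih => simpa using ih
  | case4 y z t h => rfl

theorem seg_fst_cons : ∀ (y : Int) (t : List Int), ∃ u', (seg (y :: t)).1 = y :: u' := by
  intro y t
  cases t with
  | nil => exact ⟨[], rfl⟩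
  | cons z t' =>
    simp only [seg]
    split_ifs
    · exact ⟨_, rfl⟩
    · exact ⟨[], rfl⟩

theorem seg_chain : ∀ s : List Int, s.Pairwise (· ≤ ·) →
    List.IsChain (fun a b => a ≤ b ∧ b ≤ a + 1) (seg s).1 := by
  intro s
  fun_induction seg s with
  | case1 => intro _; simp
  | case2 y => intro _; simp
  | case3 y z t h ih =>
    intro hs
    have hs' := hs.tail
    obtain ⟨u', hu⟩ := seg_fst_cons z t
    simp only
    rw [hu, List.isChain_cons_cons]
    constructor
    · constructor
      · exact (List.pairwise_cons.mp hs).1 z (by simp)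
      · omega
    · rw [← hu]; exact ih hs'
  | case4 y z t h => intro _; simp

theorem seg_gap : ∀ s : List Int, s.Pairwise (· ≤ ·) →
    ∀ y ∈ (seg s).1, ∀ z ∈ (seg s).2, y + 2 ≤ z := by
  intro s
  fun_induction seg s with
  | case1 => intro _ y hy; simp at hy
  | case2 w => intro _ y hy z hz; simp at hz
  | case3 y z t h ih =>
    intro hs y' hy' w hw
    have hs' := hs.tail
    obtain ⟨u', hu⟩ := seg_fst_cons z t
    simp only at hy' hw
    rcases List.mem_cons.mp hy' with rfl | hy''
    · have hz_mem : z ∈ (seg (z :: t)).1 := by rw [hu]; simp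
      have := ih hs' z hz_mem w hw
      have hyz : y' ≤ z := (List.pairwise_cons.mp hs).1 z (by simp)
      omega
    · exact ih hs' y' hy'' w hw
  | case4 y z t h =>
    intro hs y' hy' w hw
    simp only at hy' hw
    rcases List.mem_cons.mp hy' with rfl | hy''
    · rcases List.mem_cons.mp hw with rfl | hw'
      · omega
      · have h1 : y' ≤ z := (List.pairwise_cons.mp hs).1 z (by simp)
        have h2 : z ≤ w := (List.pairwise_cons.mp hs.tail).1 w hw'
        omega
    · simp at hy''

theorem bfold_chain : ∀ (u' : List Int) (h : Int) (b r : Int),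
    List.IsChain (fun a b => a ≤ b ∧ b ≤ a + 1) (h :: u') → r ≤ b →
    u'.foldl bstep (b, r, some h) =
      (max b (r + (u'.length : Int)), r + (u'.length : Int), some (u'.getLastD h)) := by
  intro u'
  induction u' with
  | nil =>
    intro h b r _ hrb
    simp only [List.foldl_nil, List.length_nil, Nat.cast_zero, Int.add_zero, List.getLastD]
    have : max b r = b := by omega
    rw [this]
  | cons y t ih =>
    intro h b r hc hrb
    rw [List.isChain_cons_cons] at hc
    obtain ⟨⟨h1, h2⟩, hc⟩ := hc
    rw [List.foldl_cons]
    have hstep : bstep (b, r, some h) y = (max b (r + 1), r + 1, some y) := by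
      simp only [bstep]
      rw [if_pos (by omega : y - h ≤ 1)]
      have : (if r + 1 > b then r + 1 else b) = max b (r + 1) := by omega
      rw [this]
    rw [hstep, ih y (max b (r+1)) (r+1) hc (by omega)]
    have e1 : max (max b (r+1)) (r + 1 + (t.length : Int)) = max b (r + ((y :: t).length : Int)) := by
      simp only [List.length_cons]
      push_cast
      omega
    have e2 : r + 1 + (t.length : Int) = r + ((y :: t).length : Int) := by
      simp only [List.length_cons]; push_cast; omega
    rw [e1, e2, List.getLastD_cons]

theorem bfold_mono : ∀ (v : List Int) (b b' r : Int) (pr : Option Int),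
    (v.foldl bstep (max b b', r, pr)).1 = max b ((v.foldl bstep (b', r, pr)).1) := by
  intro v
  induction v with
  | nil => intros; rfl
  | cons x t ih =>
    intro b b' r pr
    rw [List.foldl_cons, List.foldl_cons]
    have hrun : ∀ B : Int, bstep (B, r, pr) x =
        ((if (match pr with | some p => if x - p ≤ 1 then r + 1 else 1 | none => 1) > B
          then (match pr with | some p => if x - p ≤ 1 then r + 1 else 1 | none => 1) else B),
         (match pr with | some p => if x - p ≤ 1 then r + 1 else 1 | none => 1), some x) := by
      intro B; rfl
    rw [hrun, hrun]
    generalize (match pr with | some p => if x - p ≤ 1 then r + 1 else 1 | none => 1) = run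
    have : (if run > max b b' then run else max b b') = max b (if run > b' then run else b') := by
      omega
    rw [this, ih]

theorem core : ∀ (n : Nat) (s : List Int), s.length ≤ n → s.Pairwise (· ≤ ·) →
    s.foldl (fmax (cval s)) 0 = (s.foldl bstep (0, 0, none)).1 := by
  intro n
  induction n with
  | zero =>
    intro s hlen _
    have : s = [] := List.eq_nil_of_length_eq_zero (by omega)
    subst this; rfl
  | succ n ih =>
    intro s hlen hs
    match s with
    | [] => rfl
    | y :: t =>
      obtain ⟨u', hu⟩ := seg_fst_cons y t
      have happ := seg_append (y :: t)
      have hchain := seg_chain (y :: t) hs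
      have hgap := seg_gap (y :: t) hs
      set u := (seg (y :: t)).1 with hudef
      set v := (seg (y :: t)).2 with hvdef
      have hpw : (u ++ v).Pairwise (· ≤ ·) := by rw [happ]; exact hs
      rw [List.pairwise_append] at hpw
      obtain ⟨hpwu, hpwv, hcross⟩ := hpw
      -- value facts
      have hvalu : ∀ x ∈ u, (gl (u ++ v) x).1 = (gl u x).1 := by
        intro x hx
        rw [gl_append]
        have hLmem : (gl u x).2 ∈ u := by
          rcases gl_largest u x with h | h
          · rw [h]; exact hx
          · exact h
        rw [gl_zero v _ (fun z hz => by have := hgap _ hLmem z hz; omega)]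
        simp
      have hvalv : ∀ x ∈ v, (gl (u ++ v) x).1 = (gl v x).1 := by
        intro x hx
        rw [gl_append, gl_zero u x (fun z hz => by have := hgap z hz x hx; omega)]
        simp
      have hheadval : (gl u y).1 = u.length := by
        rw [hu]
        simp only [gl]
        rw [if_pos (by omega : y - y = 0 ∨ y - y = 1)]
        rw [gl_chain u' y (by rw [← hu]; exact hchain)]
        simp
      -- A side
      have hulen_pos : 0 < u.length := by rw [hu]; simp
      rw [← happ]
      set c := cval (u ++ v) with hcdef
      have hcu : ∀ x ∈ u, c x = ((gl u x).1 : Int) := by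
        intro x hx
        rw [hcdef]
        simp only [cval]
        rw [hvalu x hx]
      have hcv : ∀ x ∈ v, c x = cval v x := by
        intro x hx
        rw [hcdef]
        simp only [cval]
        rw [hvalv x hx]
      have hAfold : (u ++ v).foldl (fmax c) 0
          = max (u.length : Int) (v.foldl (fmax (cval v)) 0) := by
        rw [List.foldl_append]
        have hufold : u.foldl (fmax c) 0 = (u.length : Int) := by
          have hf : fmax c 0 y = (u.length : Int) := by
            simp only [fmax]
            rw [hcu y (by rw [hu]; simp), hheadval]
            rw [if_pos (by exact_mod_cast hulen_pos)]
          rw [hu, List.foldl_cons, ← hu, hf]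
          apply foldl_fmax_le
          intro x hx
          have hxu : x ∈ u := by rw [hu]; simp [hx]
          rw [hcu x hxu]
          have := gl_le_length u x
          exact_mod_cast this
        rw [hufold]
        rw [PySem.List.foldl_congr_mem v _ (fmax (cval v)) _
          (fun acc x hx => by simp only [fmax]; rw [hcv x hx])]
        rw [show (u.length : Int) = max (u.length : Int) 0 from by omega]
        rw [foldl_fmax_init]
        omega
      -- B side: the fold over the first segment u
      have hBu : u.foldl bstep (0, 0, none) = ((u.length : Int), (u.length : Int), some (u'.getLastD y)) := by
        have hlen' : (u.length : Int) = (u'.length : Int) + 1 := by rw [hu]; push_cast [List.length_cons]; omega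
        rw [hu, List.foldl_cons]
        have h1 : bstep (0, 0, none) y = (1, 1, some y) := rfl
        rw [h1, bfold_chain u' y 1 1 (by rw [← hu]; exact hchain) (le_refl 1)]
        rw [← hu]
        simp only [Prod.mk.injEq]
        exact ⟨by omega, by omega, trivial⟩
      have hlensum : u.length + v.length = t.length + 1 := by
        have := congrArg List.length happ
        simpa using this
      have hlast_mem : u'.getLastD y ∈ u := by rw [hu]; exact List.getLastD_mem_cons
      rw [hAfold, List.foldl_append, hBu]
      clear hcu hcv hAfold hcdef
      clear_value u v
      cases v with
      | nil => simp
      | cons z v' =>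
        have hzv : z ∈ z :: v' := by simp
        have hgapz := hgap _ hlast_mem z hzv
        have hstep1 : bstep ((u.length : Int), (u.length : Int), some (u'.getLastD y)) z
            = ((u.length : Int), 1, some z) := by
          have h1le : (1:Int) ≤ (u.length : Int) := by exact_mod_cast hulen_pos
          simp only [bstep]
          rw [if_neg (show ¬ z - u'.getLastD y ≤ 1 by omega)]
          simp only [Prod.mk.injEq]
          refine ⟨by omega, trivial⟩
        conv_rhs => rw [List.foldl_cons, hstep1]
        have hmono := bfold_mono v' (u.length : Int) 1 1 (some z)
        rw [show max ((u.length : Int)) 1 = (u.length : Int) from by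
          have : (1:Int) ≤ (u.length : Int) := by exact_mod_cast hulen_pos
          omega] at hmono
        rw [hmono]
        have hih := ih (z :: v') (by simp only [List.length_cons] at hlen hlensum ⊢; omega) hpwv
        have hfirst : (z :: v').foldl bstep (0, 0, none) = v'.foldl bstep (1, 1, some z) := by
          rw [List.foldl_cons]; rfl
        rw [hfirst] at hih
        rw [← hih]

-- ===== VERDICT (by name: the statement is the Claim_ definition above) =====
theorem picking_tickets_spec : Claim_equal_picking_tickets := by
  intro arr _
  unfold Spec_picking_tickets
  have hq := quicksort_props arr
  have hsorted : PySem.List.sorted arr (fun x => x) false = quicksort arr :=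
    PySem.List.sorted_id_eq_of_perm_of_pairwise arr (quicksort arr) hq.1 hq.2
  have h1 : picking_tickets arr
      = ((quicksort arr).foldl (astep (quicksort arr)) ((0 : Int), (0 : Nat))).1 := rfl
  have h2 : picking_tickets_alt arr
      = ((PySem.List.sorted arr (fun x => x) false).foldl bstep (0, 0, none)).1 := rfl
  rw [h1, h2, hsorted]
  have houter := outer (quicksort arr) hq.2 (quicksort arr).length 0 0 (by omega)
  rw [List.drop_zero] at houter
  rw [houter]
  exact core (quicksort arr).length (quicksort arr) (le_refl _) hq.2
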